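-- pv_equiv track=rewrite | github.com/LiamVDB1/Truth-Engine | src/truth_engine/services/run_trace.py | _markdown_fence
-- ===== SOURCE A (Python) =====
-- def _markdown_fence(content: str) -> str:
--     longest_run = 0
--     current_run = 0
--     for char in content:
--         if char == "`":
--             current_run += 1
--             longest_run = max(longest_run, current_run)
--         else:
--             current_run = 0
--     return "`" * max(3, longest_run + 1)
-- ===== SOURCE B (Python) =====
-- def _markdown_fence(content: str) -> str:
--     masked = "".join(ch if ch == "`" else " " for ch in content)
--     runs = masked.split()
--     longest = max((len(run) for run in runs), default=0)
--     return "`" * max(3, longest + 1)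
-- ===== Notes on version B (the rewrite author's own statement) =====
-- stated objective: idiomatic
-- what changed: B masks non-backtick characters to spaces, collects every maximal backtick run at once with str.split(), and reduces with max(..., default=0), instead of A's explicit loop maintaining current/longest run counters.
import Mathlib
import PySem

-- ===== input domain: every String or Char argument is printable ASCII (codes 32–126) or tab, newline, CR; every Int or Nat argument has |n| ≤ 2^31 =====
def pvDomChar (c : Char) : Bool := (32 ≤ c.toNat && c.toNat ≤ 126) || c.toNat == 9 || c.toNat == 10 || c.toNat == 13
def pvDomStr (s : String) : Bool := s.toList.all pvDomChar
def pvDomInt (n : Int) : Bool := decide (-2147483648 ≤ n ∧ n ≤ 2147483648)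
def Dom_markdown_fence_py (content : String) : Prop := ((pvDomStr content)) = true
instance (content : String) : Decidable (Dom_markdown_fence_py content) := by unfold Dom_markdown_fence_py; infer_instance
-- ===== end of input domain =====

-- B replaces A's explicit run-counting loop by masking non-backticks to spaces, splitting into the
-- maximal backtick runs, and reducing with max(..., default=0); same O(n) cost (objective: idiomatic).

-- ===== PORT A =====
-- literal port of A's loop: state (longest_run, current_run); '"`" * n' is List.replicate (n ≥ 3 here)
def markdown_fence_py (content : String) : String :=
  let st := content.toList.foldl
    (fun (p : Int × Int) char =>
      if char = '`' then (max p.1 (p.2 + 1), p.2 + 1) else (p.1, (0 : Int)))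
    ((0 : Int), (0 : Int))
  String.ofList (List.replicate (max 3 (st.1 + 1)).toNat '`')

-- ===== PORT B =====
-- '"".join(ch if ch == "`" else " " for ch in content)' ported as a per-character map (exact);
-- masked.split() is PySem.Str.split₀; max(lengths, default=0) is PySem.List.maxD with key id
def markdown_fence_py_alt (content : String) : String :=
  let masked := String.ofList (content.toList.map (fun ch => if ch = '`' then ch else ' '))
  let runs := PySem.Str.split₀ masked
  let longest := PySem.List.maxD (runs.map (fun run => PySem.Str.len run)) id (0 : Int)
  String.ofList (List.replicate (max 3 (longest + 1)).toNat '`')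

-- ===== PRECONDITION & SPEC =====
def Spec_markdown_fence_py (content : String) (out : String) : Prop := out = markdown_fence_py_alt content
instance (content : String) (out : String) : Decidable (Spec_markdown_fence_py content out) := by unfold Spec_markdown_fence_py; infer_instance

-- ===== CLAIM (what is proved, stated in full; the proofs are below) =====
def Claim_equal_markdown_fence_py : Prop := ∀ (content : String), Dom_markdown_fence_py content → Spec_markdown_fence_py content (markdown_fence_py content)

-- ===== LEMMAS AND PROOFS =====

-- the masking function of B
def pvMask (ch : Char) : Char := if ch = '`' then ch else ' '

-- recursive characterisation of split₀ applied to a masked string: the maximal backtick runs of l,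
-- with `cur` the (reversed) run in progress
def pvRuns : List Char → List Char → List (List Char)
  | [], cur => if cur.isEmpty then [] else [cur.reverse]
  | c :: rest, cur =>
    if c = '`' then pvRuns rest (c :: cur)
    else if cur.isEmpty then pvRuns rest [] else cur.reverse :: pvRuns rest []

-- max of the lengths (as Int), default 0
def pvMlen (ws : List (List Char)) : Int := (ws.map (fun w => (w.length : Int))).foldl max 0

theorem pv_foldl_max_shift (l : List Int) (a b : Int) :
    l.foldl max (max a b) = max a (l.foldl max b) := by
  induction l generalizing b with
  | nil => rfl
  | cons x t ih =>
      simp only [List.foldl_cons, max_assoc, ih]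

theorem pvMlen_cons (w : List Char) (ws : List (List Char)) :
    pvMlen (w :: ws) = max (w.length : Int) (pvMlen ws) := by
  simp only [pvMlen, List.map_cons, List.foldl_cons]
  rw [max_comm (0 : Int), pv_foldl_max_shift]

theorem pvMlen_nonneg (ws : List (List Char)) : 0 ≤ pvMlen ws := by
  induction ws with
  | nil => simp [pvMlen]
  | cons w t ih => rw [pvMlen_cons]; omega

theorem pv_go_acc (s cur : List Char) (acc : List (List Char)) :
    PySem.Chars.split₀.go s cur acc = acc.reverse ++ PySem.Chars.split₀.go s cur [] := by
  induction s generalizing cur acc with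
  | nil =>
      by_cases h : cur.isEmpty <;> simp [PySem.Chars.split₀.go, h]
  | cons c rest ih =>
      by_cases hs : PySem.Chars.isspace c
      · by_cases h : cur.isEmpty
        · simp only [PySem.Chars.split₀.go, hs, h, if_true]
          exact ih [] acc
        · simp only [PySem.Chars.split₀.go, hs, h, if_true, Bool.false_eq_true, if_false]
          rw [ih [] (cur.reverse :: acc), ih [] [cur.reverse]]
          simp
      · simp only [PySem.Chars.split₀.go, hs, Bool.false_eq_true, if_false]
        exact ih (c :: cur) acc

theorem pv_go_mask (l cur : List Char) :
    PySem.Chars.split₀.go (l.map pvMask) cur [] = pvRuns l cur := by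
  induction l generalizing cur with
  | nil => by_cases h : cur.isEmpty <;> simp [PySem.Chars.split₀.go, pvRuns, h]
  | cons c rest ih =>
      by_cases hc : c = '`'
      · subst hc
        rw [List.map_cons, show pvMask '`' = '`' by decide]
        simp only [PySem.Chars.split₀.go, show PySem.Chars.isspace '`' = false by decide,
          Bool.false_eq_true, if_false]
        rw [ih ('`' :: cur)]
        simp [pvRuns]
      · have hm : pvMask c = ' ' := by simp [pvMask, hc]
        rw [List.map_cons, hm]
        simp only [PySem.Chars.split₀.go, show PySem.Chars.isspace ' ' = true by decide, if_true]
        by_cases h : cur.isEmpty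
        · simp only [h, if_true]
          rw [ih []]
          simp [pvRuns, hc, h]
        · simp only [h, Bool.false_eq_true, if_false]
          rw [pv_go_acc (List.map pvMask rest) [] [cur.reverse], ih []]
          simp [pvRuns, hc, h]

theorem pvRuns_ge (l : List Char) (cur : List Char) (h : cur ≠ []) :
    (cur.length : Int) ≤ pvMlen (pvRuns l cur) := by
  induction l generalizing cur with
  | nil =>
      simp only [pvRuns, show cur.isEmpty = false from by simpa using h, Bool.false_eq_true, if_false]
      rw [pvMlen_cons]
      simp [pvMlen]
  | cons c rest ih =>
      by_cases hc : c = '`'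
      · simp only [pvRuns, hc, if_true]
        have := ih ('`' :: cur) (by simp)
        simp only [List.length_cons] at this
        push_cast at this ⊢
        omega
      · simp only [pvRuns, hc, if_false,
          show cur.isEmpty = false from by simpa using h, Bool.false_eq_true]
        rw [pvMlen_cons]
        simp

-- A's loop invariant: starting from (lr, |cur|) with |cur| ≤ lr, the final longest_run is
-- the max of lr and the lengths of the runs still to be produced
theorem pv_inv (l : List Char) (cur : List Char) (lr : Int) (h : (cur.length : Int) ≤ lr) :
    (l.foldl
      (fun (p : Int × Int) char =>
        if char = '`' then (max p.1 (p.2 + 1), p.2 + 1) else (p.1, (0 : Int)))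
      (lr, (cur.length : Int))).1 = max lr (pvMlen (pvRuns l cur)) := by
  induction l generalizing cur lr with
  | nil =>
      by_cases hcur : cur.isEmpty
      · simp only [List.foldl_nil, pvRuns, hcur, if_true]
        simp [pvMlen]
        omega
      · simp only [List.foldl_nil, pvRuns, hcur, Bool.false_eq_true, if_false]
        rw [pvMlen_cons]
        simp only [pvMlen, List.map_nil, List.foldl_nil, List.length_reverse]
        omega
  | cons c rest ih =>
      by_cases hc : c = '`'
      · simp only [List.foldl_cons, hc, if_true, pvRuns]
        have h1 : ((('`' :: cur).length : Int)) ≤ max lr ((cur.length : Int) + 1) := by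
          simp
        have := ih ('`' :: cur) (max lr ((cur.length : Int) + 1)) h1
        simp only [List.length_cons] at this
        push_cast at this
        rw [this]
        have hge := pvRuns_ge rest ('`' :: cur) (by simp)
        simp only [List.length_cons] at hge
        push_cast at hge
        omega
      · simp only [List.foldl_cons, hc, if_false, pvRuns]
        have key := ih [] lr (by simp; omega)
        simp only [List.length_nil, Int.natCast_zero] at key
        by_cases hcur : cur.isEmpty
        · simpa [hcur] using key
        · simp only [hcur, Bool.false_eq_true, if_false]
          rw [key, pvMlen_cons]
          simp only [List.length_reverse]
          have := pvMlen_nonneg (pvRuns rest [])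
          omega

theorem pv_max?_cons (x y : Int) (t : List Int) :
    PySem.List.max? (x :: y :: t) (id : Int → Int) = PySem.List.max? (max x y :: t) (id : Int → Int) := by
  simp only [PySem.List.max?, List.foldl_cons]
  congr 1
  simp only [id_eq]
  split <;> congr 1 <;> omega

theorem pv_max?_eq (x : Int) (t : List Int) :
    PySem.List.max? (x :: t) (id : Int → Int) = some (t.foldl max x) := by
  induction t generalizing x with
  | nil => rfl
  | cons y s ih =>
      rw [pv_max?_cons, ih (max x y), List.foldl_cons]

theorem pv_maxD_eq (xs : List Int) (hx : ∀ x ∈ xs, 0 ≤ x) :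
    PySem.List.maxD xs (id : Int → Int) 0 = xs.foldl max 0 := by
  cases xs with
  | nil => rfl
  | cons x t =>
      simp only [PySem.List.maxD, pv_max?_eq, Option.getD_some, List.foldl_cons]
      rw [show max (0 : Int) x = x from by have := hx x (by simp); omega]

theorem pv_mlen_eq (ws : List (List Char)) :
    (ws.map (fun w => (w.length : Int))).foldl max 0 = pvMlen ws := rfl

-- ===== VERDICT (by name: the statement is the Claim_ definition above) =====
theorem markdown_fence_py_spec : Claim_equal_markdown_fence_py := by
  intro content _
  unfold Spec_markdown_fence_py
  have hmask : (String.ofList (content.toList.map (fun ch => if ch = '`' then ch else ' '))).toList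
      = content.toList.map pvMask := by
    simp [pvMask]
  have hB : PySem.List.maxD
      ((PySem.Str.split₀ (String.ofList (content.toList.map (fun ch => if ch = '`' then ch else ' ')))).map
        (fun run => PySem.Str.len run)) id (0 : Int)
      = pvMlen (pvRuns content.toList []) := by
    simp only [PySem.Str.split₀, hmask, List.map_map]
    rw [show ((fun run => PySem.Str.len run) ∘ String.ofList) = (fun w : List Char => (w.length : Int)) from by
      funext w; simp [PySem.Str.len]]
    rw [pv_maxD_eq _ (by intro x hx; simp at hx; obtain ⟨w, _, hw⟩ := hx; omega)]
    rw [pv_mlen_eq]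
    congr 1
    exact pv_go_mask content.toList []
  have hA : (content.toList.foldl
      (fun (p : Int × Int) char =>
        if char = '`' then (max p.1 (p.2 + 1), p.2 + 1) else (p.1, (0 : Int)))
      ((0 : Int), (0 : Int))).1 = pvMlen (pvRuns content.toList []) := by
    have key := pv_inv content.toList [] 0 (by simp)
    simp only [List.length_nil, Int.natCast_zero] at key
    rw [key]
    have := pvMlen_nonneg (pvRuns content.toList [])
    omega
  simp only [markdown_fence_py, markdown_fence_py_alt]
  rw [hA, hB]
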